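-- pv_equiv track=rewrite | github.com/Hwa-Jong/Programmers | Level2/functional_development.py | solution
-- ===== SOURCE A (Python) =====
-- def solution(progresses, speeds):
--     answer = []
--
--     progresses_num = len(progresses)
--     state = 0
--
--     while True:
--         date = ceil((100 - progresses[state]) / speeds[state])
--
--         count = 1
--         for idx in range(state + 1, progresses_num):
--             if progresses[idx] + date*speeds[idx] >= 100:
--                 count += 1
--             else:
--                 break
--
--         answer.append(count)
--         state += count
--
--         if state >= progresses_num:
--             break
--
--     return answer
--
-- def ceil(value):
--     if value % 1.0 == 0.0:
--         return int(value)
--     return int(value + 1)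
-- ===== SOURCE B (Python) =====
-- def solution(progresses, speeds):
--     # precompute each task's release day, then one flat scan with a running
--     # group-leader threshold (no inner break-loop)
--     days = [-((p - 100) // s) for p, s in zip(progresses, speeds)]
--     answer = []
--     front = days[0]
--     count = 0
--     for d in days:
--         if d > front:
--             answer.append(count)
--             front = d
--             count = 1
--         else:
--             count += 1
--     answer.append(count)
--     return answer
-- ===== Notes on version B (the rewrite author's own statement) =====
-- stated objective: simpler
-- what changed: A recomputes the leader's date and re-scans with a nested break-loop per group; B precomputes each task's release day once (integer ceiling division) and emits group sizes in a single flat scan against a running leader-day threshold.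
-- outside the precondition, e.g. on solution([50, 115], [-3, 1]): A returns [2], B returns [1, 1]; on solution([150, 106], [7, 1]): A returns [2], B returns [1, 1]
import Mathlib
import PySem

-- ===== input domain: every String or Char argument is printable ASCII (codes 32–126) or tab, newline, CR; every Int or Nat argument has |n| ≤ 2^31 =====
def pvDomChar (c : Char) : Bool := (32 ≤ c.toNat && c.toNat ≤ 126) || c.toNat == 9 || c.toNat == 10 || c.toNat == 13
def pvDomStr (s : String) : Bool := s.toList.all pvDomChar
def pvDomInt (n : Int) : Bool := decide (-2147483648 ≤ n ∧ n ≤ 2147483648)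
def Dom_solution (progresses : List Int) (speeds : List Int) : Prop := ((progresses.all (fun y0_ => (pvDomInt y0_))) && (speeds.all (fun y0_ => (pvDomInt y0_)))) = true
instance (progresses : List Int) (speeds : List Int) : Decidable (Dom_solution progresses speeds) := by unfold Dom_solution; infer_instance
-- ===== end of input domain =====

-- B replaces A's per-group leader-date recomputation and nested break-loop by a precomputed
-- release-day array scanned once against a running leader-day threshold (objective: simpler).

-- ===== PORT A =====
-- A's helper `ceil` applied to the Python float quotient n/s.  Ported in exact integer
-- arithmetic: under Pre_ (1 ≤ s, progress ≤ 100, so 0 ≤ n, and |values| ≤ 2^31) the float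
-- quotient's fractional test and truncation agree with floor division, so this is exact there.
def pyCeilQ (n : Int) (s : Int) : Int :=
  if PySem.Int.mod n s = 0 then PySem.Int.floordiv n s else PySem.Int.floordiv n s + 1

-- inner `for idx in range(state+1, n)` loop with its break; list indexing is total `getD`
-- (the index is always in range when it is reached: idx < ps.length ≤ ss.length under Pre_)
def innerA (ps ss : List Int) (date : Int) (idx : Nat) (count : Nat) : Nat :=
  if idx < ps.length then
    if ps.getD idx 0 + date * ss.getD idx 0 ≥ 100 then innerA ps ss date (idx + 1) (count + 1)
    else count
  else count
termination_by ps.length - idx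

-- the `while True` loop; fuel = ps.length suffices because state grows by count ≥ 1 each turn
def outerA (ps ss : List Int) (fuel : Nat) (state : Nat) (answer : List Int) : List Int :=
  match fuel with
  | 0 => answer
  | fuel + 1 =>
    let date := pyCeilQ (100 - ps.getD state 0) (ss.getD state 0)
    let count := innerA ps ss date (state + 1) 1
    let answer' := answer ++ [(count : Int)]
    let state' := state + count
    if state' ≥ ps.length then answer' else outerA ps ss fuel state' answer'

def solution (progresses : List Int) (speeds : List Int) : List Int :=
  outerA progresses speeds progresses.length 0 []

-- ===== PORT B =====
-- Source B: days = [-((p - 100) // s) for p, s in zip(...)]; then one flat scan.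
-- `front = days[0]` raises IndexError on empty input in Python (excluded by Pre_);
-- the total port reads it with default 0.
def solution_alt (progresses : List Int) (speeds : List Int) : List Int :=
  let days := (progresses.zip speeds).map (fun pr => -(PySem.Int.floordiv (pr.1 - 100) pr.2))
  let r := days.foldl
    (fun (st : List Int × Int × Int) d =>
      if d > st.2.1 then (st.1 ++ [st.2.2], d, 1) else (st.1, st.2.1, st.2.2 + 1))
    ([], days.getD 0 0, 0)
  r.1 ++ [r.2.2]

-- ===== PRECONDITION & SPEC =====
-- Pre_ excludes: empty progresses and speeds shorter than progresses (A raises IndexError),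
-- a zero speed (A raises ZeroDivisionError), and — stated narrowing to the problem's natural
-- domain — negative speeds or progresses above 100, where A's value is an artefact of its
-- float division and of `ceil`'s int() truncation toward zero on negative quotients.
def Pre_solution (progresses : List Int) (speeds : List Int) : Prop :=
  (!progresses.isEmpty && decide (progresses.length ≤ speeds.length) &&
   progresses.all (fun p => decide (p ≤ 100)) &&
   (speeds.take progresses.length).all (fun s => decide (1 ≤ s))) = true
instance (progresses : List Int) (speeds : List Int) : Decidable (Pre_solution progresses speeds) := by
  unfold Pre_solution; infer_instance

def pvWitness_solution : List Int × List Int := ([93, 30, 55], [1, 30, 5])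

def Spec_solution (progresses : List Int) (speeds : List Int) (out : List Int) : Prop := out = solution_alt progresses speeds
instance (progresses : List Int) (speeds : List Int) (out : List Int) : Decidable (Spec_solution progresses speeds out) := by unfold Spec_solution; infer_instance

-- ===== CLAIM (what is proved, stated in full; the proofs are below) =====
def Claim_equal_solution : Prop := ∀ (progresses : List Int) (speeds : List Int), Dom_solution progresses speeds → Pre_solution progresses speeds → Spec_solution progresses speeds (solution progresses speeds)

-- ===== LEMMAS AND PROOFS =====

-- the common reference: B's days list
def daysOf (ps ss : List Int) : List Int :=
  (ps.zip ss).map (fun pr => -(PySem.Int.floordiv (pr.1 - 100) pr.2))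

-- grouping of a day list by a running leader threshold (the shape of B's scan)
def groups (front count : Int) : List Int → List Int
  | [] => [count]
  | d :: rest => if front < d then count :: groups d 1 rest else groups front (count + 1) rest

-- length of the leading run of days ≤ date
def tw (date : Int) (l : List Int) : Nat := (l.takeWhile (fun d => decide (d ≤ date))).length

lemma ceil_eq (n s : Int) (hs : 0 < s) :
    pyCeilQ n s = -(PySem.Int.floordiv (-n) s) := by
  have hb := (PySem.Int.floordiv_eq_iff_of_pos (a := n) (b := s) hs).mp rfl
  have hm := PySem.Int.floordiv_mul_add_mod n s
  unfold pyCeilQ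
  rw [eq_comm, PySem.Int.neg_floordiv_neg_eq_iff_of_pos hs]
  split_ifs with h
  · rw [h] at hm
    constructor <;> nlinarith
  · have hne : n ≠ PySem.Int.floordiv n s * s := by
      intro he; apply h; omega
    have hlt : PySem.Int.floordiv n s * s < n := lt_of_le_of_ne hb.1 (Ne.symm hne)
    constructor <;> nlinarith

lemma day_le_iff (p s date : Int) (hs : 0 < s) :
    (-(PySem.Int.floordiv (p - 100) s) ≤ date) ↔ p + date * s ≥ 100 := by
  rw [neg_le, PySem.Int.le_floordiv_iff_mul_le hs]
  constructor <;> intro h <;> nlinarith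

lemma daysOf_length (ps ss : List Int) (h : ps.length ≤ ss.length) :
    (daysOf ps ss).length = ps.length := by
  simp [daysOf]; omega

lemma daysOf_getElem (ps ss : List Int) (i : Nat)
    (hi : i < (daysOf ps ss).length) (hi' : i < ps.length) (hi'' : i < ss.length) :
    (daysOf ps ss)[i] = -(PySem.Int.floordiv (ps[i] - 100) ss[i]) := by
  simp [daysOf]

lemma getD_eq_getElem' (l : List Int) (i : Nat) (h : i < l.length) : l.getD i 0 = l[i] :=
  List.getD_eq_getElem l 0 h

lemma tw_cons (date d : Int) (r : List Int) :
    tw date (d :: r) = if d ≤ date then tw date r + 1 else 0 := by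
  simp [tw, List.takeWhile_cons]; split_ifs <;> simp_all

lemma tw_le (date : Int) (l : List Int) : tw date l ≤ l.length :=
  (List.takeWhile_sublist _).length_le

lemma inner_eq (ps ss : List Int) (date : Int) (hlen : ps.length ≤ ss.length)
    (hsp : ∀ i, i < ps.length → 1 ≤ ss.getD i 0) :
    ∀ k idx count, ps.length - idx ≤ k →
      innerA ps ss date idx count = count + tw date ((daysOf ps ss).drop idx) := by
  have hD : (daysOf ps ss).length = ps.length := daysOf_length ps ss hlen
  intro k
  induction k with
  | zero =>
    intro idx count h
    have hge : ¬ idx < ps.length := by omega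
    rw [innerA, if_neg hge]
    rw [List.drop_eq_nil_of_le (by omega)]
    simp [tw]
  | succ k ih =>
    intro idx count h
    by_cases hidx : idx < ps.length
    · have hidx2 : idx < (daysOf ps ss).length := by omega
      have hidx3 : idx < ss.length := by omega
      have hdrop : (daysOf ps ss).drop idx
          = (daysOf ps ss)[idx] :: (daysOf ps ss).drop (idx + 1) :=
        List.drop_eq_getElem_cons hidx2
      have hs0 : (0 : Int) < ss[idx] := by
        have := hsp idx hidx
        rw [getD_eq_getElem' ss idx hidx3] at this
        omega
      have hcond : (ps.getD idx 0 + date * ss.getD idx 0 ≥ 100)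
          ↔ (daysOf ps ss)[idx] ≤ date := by
        rw [getD_eq_getElem' ps idx hidx, getD_eq_getElem' ss idx hidx3,
          daysOf_getElem ps ss idx hidx2 hidx hidx3, day_le_iff _ _ _ hs0]
      rw [innerA, if_pos hidx]
      by_cases hc : ps.getD idx 0 + date * ss.getD idx 0 ≥ 100
      · rw [if_pos hc, ih (idx + 1) (count + 1) (by omega), hdrop, tw_cons,
          if_pos (hcond.mp hc)]
        omega
      · rw [if_neg hc, hdrop, tw_cons, if_neg (fun hh => hc (hcond.mpr hh))]
        omega
    · have hge : ¬ idx < ps.length := hidx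
      rw [innerA, if_neg hge]
      rw [List.drop_eq_nil_of_le (by omega)]
      simp [tw]

lemma groups_run (f : Int) (l : List Int) : ∀ c,
    groups f c l = (c + (tw f l : Int)) ::
      (match l.drop (tw f l) with
       | [] => []
       | d' :: r' => groups d' 1 r') := by
  induction l with
  | nil => intro c; simp [groups, tw]
  | cons d rest ih =>
    intro c
    by_cases h : d ≤ f
    · have hnf : ¬ f < d := not_lt.mpr h
      simp only [groups, if_neg hnf, tw_cons, if_pos h]
      rw [ih (c + 1)]
      simp only [List.drop_succ_cons]
      congr 1
      push_cast; ring
    · simp only [groups, if_pos (not_le.mp h), tw_cons, if_neg h]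
      simp

lemma groups_cons (f c d : Int) (r : List Int) :
    groups f c (d :: r) = if f < d then c :: groups d 1 r else groups f (c + 1) r := rfl

lemma foldB (days : List Int) : ∀ acc front count,
    (let r := days.foldl
      (fun (st : List Int × Int × Int) d =>
        if d > st.2.1 then (st.1 ++ [st.2.2], d, 1) else (st.1, st.2.1, st.2.2 + 1))
      (acc, front, count)
     r.1 ++ [r.2.2]) = acc ++ groups front count days := by
  induction days with
  | nil => intro acc front count; simp [groups]
  | cons d rest ih =>
    intro acc front count
    simp only [List.foldl_cons, groups]
    by_cases h : front < d
    · simp only [h]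
      rw [ih]; simp
    · simp only [h]
      rw [ih]; simp

lemma outer_eq (ps ss : List Int) (hlen : ps.length ≤ ss.length)
    (hsp : ∀ i, i < ps.length → 1 ≤ ss.getD i 0) :
    ∀ fuel state acc, state < ps.length → ps.length - state ≤ fuel →
      outerA ps ss fuel state acc =
        acc ++ groups ((daysOf ps ss).getD state 0) 1 ((daysOf ps ss).drop (state + 1)) := by
  have hD : (daysOf ps ss).length = ps.length := daysOf_length ps ss hlen
  intro fuel
  induction fuel with
  | zero => intro state acc hstate hfuel; omega
  | succ fuel ih =>
    intro state acc hstate hfuel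
    have hstate2 : state < (daysOf ps ss).length := by omega
    have hstate3 : state < ss.length := by omega
    have hs0 : (0 : Int) < ss.getD state 0 := by have := hsp state hstate; omega
    -- the date A computes is B's day at the leader index
    have hdate : pyCeilQ (100 - ps.getD state 0) (ss.getD state 0)
        = (daysOf ps ss).getD state 0 := by
      rw [ceil_eq _ _ hs0, getD_eq_getElem' (daysOf ps ss) state hstate2,
        getD_eq_getElem' ps state hstate, getD_eq_getElem' ss state hstate3,
        daysOf_getElem ps ss state hstate2 hstate hstate3]
      norm_num
    set date := (daysOf ps ss).getD state 0 with hdatedef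
    set k := tw date ((daysOf ps ss).drop (state + 1)) with hkdef
    have hcount : innerA ps ss (pyCeilQ (100 - ps.getD state 0) (ss.getD state 0)) (state + 1) 1
        = 1 + k := by
      rw [hdate]
      exact inner_eq ps ss date hlen hsp ps.length (state + 1) 1 (by omega)
    have hk : k ≤ ps.length - (state + 1) := by
      have := tw_le date ((daysOf ps ss).drop (state + 1))
      simpa [hD] using this
    have hdd : ((daysOf ps ss).drop (state + 1)).drop k = (daysOf ps ss).drop (state + 1 + k) := by
      rw [List.drop_drop]
    have hrun := groups_run date ((daysOf ps ss).drop (state + 1)) 1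
    simp only [outerA, hcount]
    by_cases hend : ps.length ≤ state + (1 + k)
    · rw [if_pos (by omega)]
      have hnil : (daysOf ps ss).drop (state + 1 + k) = [] :=
        List.drop_eq_nil_of_le (by omega)
      rw [hrun, ← hkdef, hdd, hnil]
      push_cast
      ring_nf
    · rw [if_neg (by omega)]
      have hlt : state + 1 + k < (daysOf ps ss).length := by omega
      have hcons : (daysOf ps ss).drop (state + 1 + k)
          = (daysOf ps ss)[state + 1 + k] :: (daysOf ps ss).drop (state + 1 + k + 1) :=
        List.drop_eq_getElem_cons hlt
      rw [ih (state + (1 + k)) (acc ++ [((1 + k : Nat) : Int)]) (by omega) (by omega)]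
      rw [hrun, ← hkdef, hdd, hcons]
      rw [getD_eq_getElem' (daysOf ps ss) (state + (1 + k)) (by omega)]
      have harr : state + (1 + k) = state + 1 + k := by omega
      simp only [harr, List.append_assoc, List.cons_append, List.nil_append]
      push_cast
      ring_nf

-- ===== VERDICT (by name: the statement is the Claim_ definition above) =====
theorem solution_spec : Claim_equal_solution := by
  intro ps ss _hdom hpre
  unfold Pre_solution at hpre
  simp only [Bool.and_eq_true, decide_eq_true_eq, List.all_eq_true,
    Bool.not_eq_true'] at hpre
  obtain ⟨⟨⟨hne, hlen⟩, _h100⟩, hs⟩ := hpre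
  have hpos : 0 < ps.length := by
    cases ps with
    | nil => simp at hne
    | cons a l => simp
  have hsp : ∀ i, i < ps.length → 1 ≤ ss.getD i 0 := by
    intro i hi
    have hi' : i < ss.length := lt_of_lt_of_le hi hlen
    rw [getD_eq_getElem' ss i hi']
    have hit : i < (ss.take ps.length).length := by simp; omega
    have hmem : ss[i] ∈ ss.take ps.length := by
      have : (ss.take ps.length)[i] = ss[i] := List.getElem_take
      rw [← this]; exact List.getElem_mem hit
    exact hs _ hmem
  have hD : (daysOf ps ss).length = ps.length := daysOf_length ps ss hlen
  unfold Spec_solution solution solution_alt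
  rw [outer_eq ps ss hlen hsp ps.length 0 [] hpos (by omega)]
  rw [foldB]
  rw [show List.map (fun pr => -PySem.Int.floordiv (pr.1 - 100) pr.2) (ps.zip ss) = daysOf ps ss from rfl]
  cases hDs : daysOf ps ss with
  | nil => exfalso; rw [hDs] at hD; simp at hD; omega
  | cons d0 rest =>
    have : (daysOf ps ss).getD 0 0 = d0 := by rw [hDs]; rfl
    rw [hDs] at *
    simp only [List.nil_append, List.getD_cons_zero, List.drop_succ_cons, List.drop_zero]
    rw [groups_cons, if_neg (lt_irrefl d0)]
    norm_num
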